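-- pv_equiv track=rewrite | github.com/Devsstudent/404 | prog/script_word.py | switch_left
-- ===== SOURCE A (Python) =====
-- def isVoyelle(letter):
-- 	if (letter == 'a' or letter == 'e' or letter == 'i' or letter == 'o' or letter == 'u' or letter == 'y'):
-- 		return (True)
-- 	return (False)
--
-- def get_next_pos_voyelle_r(str, pos):
-- 	i = pos
-- 	while (i > -1):
-- 		if (isVoyelle(str[i])):
-- 			return i
-- 		i = i - 1
-- 	return (len(str) - 1)
--
-- def switch_left(st):
-- 	li = list(st)
-- 	i = len(st) - 1
-- 	poss = 0
-- 	idx = -1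
-- 	while (i > -1):
-- 		if isVoyelle(li[i]) and poss == 0:
-- 			idx = i
-- 			poss = get_next_pos_voyelle_r(li, i - 1)
-- 			if (poss == len(st) - 1):
-- 				return "".join(li)
-- 			buff = li[poss]
-- 			li[poss] = li[idx]
-- 			li[idx] = buff
-- 		elif (isVoyelle(li[i]) and i != poss):
-- 			poss = i
-- 			buff = li[poss]
-- 			li[poss] = li[idx]
-- 			li[idx] = buff
-- 		i = i - 1
-- 	return "".join(li)
-- ===== SOURCE B (Python) =====
-- def switch_left(st):
--     li = list(st)
--     positions = [i for i, c in enumerate(li) if c in 'aeiouy']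
--     if len(positions) <= 1:
--         return ''.join(li)
--     vowels = [li[p] for p in positions]
--     rotated = vowels[1:] + vowels[:1]
--     for p, v in zip(positions, rotated):
--         li[p] = v
--     return ''.join(li)
-- ===== Notes on version B (the rewrite author's own statement) =====
-- stated objective: simpler
-- what changed: Replaces A's anchored backward swap-scan (stateful poss/idx swap chain plus a second right-to-left helper scan) with a single gather/rotate/scatter pass: collect vowel positions and chars, cyclically left-rotate the chars, write them back.
import Mathlib
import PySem

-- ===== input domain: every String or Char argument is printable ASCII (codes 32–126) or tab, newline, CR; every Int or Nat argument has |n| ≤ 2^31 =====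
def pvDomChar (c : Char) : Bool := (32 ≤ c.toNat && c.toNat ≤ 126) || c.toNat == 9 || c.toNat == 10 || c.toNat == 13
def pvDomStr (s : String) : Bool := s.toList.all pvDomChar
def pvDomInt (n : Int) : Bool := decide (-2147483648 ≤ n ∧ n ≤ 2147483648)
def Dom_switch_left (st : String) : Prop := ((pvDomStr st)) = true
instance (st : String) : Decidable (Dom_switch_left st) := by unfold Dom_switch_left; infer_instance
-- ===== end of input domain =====

-- B replaces A's anchored backward swap-scan with a single gather / rotate-left / scatter pass (simpler; same O(n) cost).

-- ===== PORT A =====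
def isVoyelle (letter : Char) : Bool :=
  letter = 'a' || letter = 'e' || letter = 'i' || letter = 'o' || letter = 'u' || letter = 'y'

-- while i > -1 loop of get_next_pos_voyelle_r; str[i] via pyGetD (in range at every reachable call)
def get_next_pos_voyelle_r (str : List Char) (pos : Int) : Int :=
  if _h : pos > -1 then
    if isVoyelle (PySem.List.pyGetD str pos ' ') then pos
    else get_next_pos_voyelle_r str (pos - 1)
  else (str.length : Int) - 1
termination_by (pos + 1).toNat
decreasing_by omega

-- the while-loop of switch_left; li keeps st's length, so len(st) = li.length
def switchLeftLoop (li : List Char) (i poss idx : Int) : List Char :=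
  if _h : i > -1 then
    if isVoyelle (PySem.List.pyGetD li i ' ') && (poss == 0) then
      let idx' := i
      let poss' := get_next_pos_voyelle_r li (i - 1)
      if poss' == (li.length : Int) - 1 then li
      else
        let buff := PySem.List.pyGetD li poss' ' '
        let li1 := PySem.List.pySetD li poss' (PySem.List.pyGetD li idx' ' ')
        let li2 := PySem.List.pySetD li1 idx' buff
        switchLeftLoop li2 (i - 1) poss' idx'
    else if isVoyelle (PySem.List.pyGetD li i ' ') && !(i == poss) then
      let poss' := i
      let buff := PySem.List.pyGetD li poss' ' '
      let li1 := PySem.List.pySetD li poss' (PySem.List.pyGetD li idx ' ')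
      let li2 := PySem.List.pySetD li1 idx buff
      switchLeftLoop li2 (i - 1) poss' idx
    else switchLeftLoop li (i - 1) poss idx
  else li
termination_by (i + 1).toNat
decreasing_by all_goals omega

def switch_left (st : String) : String :=
  let li := st.toList
  String.ofList (switchLeftLoop li ((li.length : Int) - 1) 0 (-1))

-- ===== PORT B =====
def switch_left_alt (st : String) : String :=
  let li := st.toList
  let positions := ((PySem.List.enumerate li 0).filter (fun ic => ("aeiouy".toList).contains ic.2)).map (·.1)
  if positions.length ≤ 1 then String.ofList li
  else
    let vowels := positions.map (fun p => PySem.List.pyGetD li p ' ')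
    let rotated := PySem.List.slice vowels (some 1) none ++ PySem.List.slice vowels none (some 1)
    let li2 := (positions.zip rotated).foldl (fun l pv => PySem.List.pySetD l pv.1 pv.2) li
    String.ofList li2

-- ===== PRECONDITION & SPEC =====
def Spec_switch_left (st : String) (out : String) : Prop := out = switch_left_alt st
instance (st : String) (out : String) : Decidable (Spec_switch_left st out) := by unfold Spec_switch_left; infer_instance

-- ===== CLAIM (what is proved, stated in full; the proofs are below) =====
def Claim_equal_switch_left : Prop := ∀ (st : String), Dom_switch_left st → Spec_switch_left st (switch_left st)

-- ===== LEMMAS AND PROOFS =====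

-- vowel positions of li, in increasing order (what B computes), and the vowel chars
def vP (li : List Char) : List Int :=
  ((PySem.List.enumerate li 0).filter (fun ic => isVoyelle ic.2)).map (·.1)

def vV (li : List Char) : List Char := (vP li).map (fun p => PySem.List.pyGetD li p ' ')

-- the li-state of A's loop after the swap chain has processed vowels with rank ≥ t:
-- positions P[t..m-1] hold V[t+1..m] and position P[m] holds V[t]; everything else is li
def stateL (li : List Char) (t : Nat) : List Char :=
  ((((vP li).dropLast.drop t).zip ((vV li).drop (t + 1))).foldl
      (fun l pv => l.set pv.1.toNat pv.2) li).set
    ((vP li).getD ((vP li).length - 1) 0).toNat ((vV li).getD t ' ')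


lemma pyGetD_toNat (li : List Char) (j : Int) (h0 : 0 ≤ j) (h : j < li.length) :
    PySem.List.pyGetD li j ' ' = li[j.toNat]'(by omega) := by
  rw [PySem.List.pyGetD_of_nonneg _ _ h0, List.getD_eq_getElem]

lemma mem_vP (li : List Char) (j : Int) :
    j ∈ vP li ↔ 0 ≤ j ∧ j < li.length ∧ isVoyelle (PySem.List.pyGetD li j ' ') = true := by
  unfold vP
  simp only [List.mem_map, List.mem_filter, PySem.List.mem_enumerate_iff]
  constructor
  · rintro ⟨⟨p1, p2⟩, ⟨⟨k, hk, hpk⟩, hv⟩, rfl⟩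
    simp only [Prod.mk.injEq] at hpk
    obtain ⟨rfl, rfl⟩ := hpk
    refine ⟨by omega, by push_cast; omega, ?_⟩
    rw [pyGetD_toNat _ _ (by omega) (by push_cast; omega)]
    simpa using hv
  · rintro ⟨h0, hn, hv⟩
    refine ⟨(j, li[j.toNat]'(by omega)), ⟨⟨j.toNat, by omega, by simp; omega⟩, ?_⟩, rfl⟩
    rw [pyGetD_toNat _ _ h0 hn] at hv
    exact hv

lemma vP_pairwise (li : List Char) : (vP li).Pairwise (· < ·) := by
  unfold vP
  exact ((PySem.List.pairwise_lt_enumerate li 0).filter _).map _ (fun _ _ h => h)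

lemma vP_strict (li : List Char) (k k' : Nat) (h : k < k') (h' : k' < (vP li).length) :
    (vP li).getD k 0 < (vP li).getD k' 0 := by
  rw [List.getD_eq_getElem _ _ (by omega), List.getD_eq_getElem _ _ h']
  exact List.pairwise_iff_getElem.1 (vP_pairwise li) k k' (by omega) h' h

lemma vP_bounds (li : List Char) (k : Nat) (h : k < (vP li).length) :
    0 ≤ (vP li).getD k 0 ∧ (vP li).getD k 0 < li.length ∧
      isVoyelle (PySem.List.pyGetD li ((vP li).getD k 0) ' ') = true := by
  have : (vP li).getD k 0 ∈ vP li := by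
    rw [List.getD_eq_getElem _ _ h]; exact List.getElem_mem h
  exact (mem_vP li _).1 this

-- any vowel position is an entry of vP
lemma vP_exists (li : List Char) (j : Int) (h0 : 0 ≤ j) (hn : j < li.length)
    (hv : isVoyelle (PySem.List.pyGetD li j ' ') = true) :
    ∃ k, k < (vP li).length ∧ (vP li).getD k 0 = j := by
  have : j ∈ vP li := (mem_vP li j).2 ⟨h0, hn, hv⟩
  obtain ⟨k, hk, he⟩ := List.mem_iff_getElem.1 this
  exact ⟨k, hk, by rw [List.getD_eq_getElem _ _ hk]; exact he⟩

lemma vV_length (li : List Char) : (vV li).length = (vP li).length := by simp [vV]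

lemma vV_getD (li : List Char) (k : Nat) (h : k < (vP li).length) :
    (vV li).getD k ' ' = PySem.List.pyGetD li ((vP li).getD k 0) ' ' := by
  rw [List.getD_eq_getElem _ _ (by rw [vV_length]; omega), List.getD_eq_getElem _ _ h]
  simp [vV]

lemma foldl_set_length (l : List Char) (pairs : List (Int × Char)) :
    (pairs.foldl (fun l pv => l.set pv.1.toNat pv.2) l).length = l.length := by
  induction pairs generalizing l with
  | nil => rfl
  | cons p rest ih => simp [List.foldl_cons, ih]

lemma foldl_set_comm (l : List Char) (pairs : List (Int × Char)) (p : Nat) (v : Char)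
    (h : ∀ pv ∈ pairs, pv.1.toNat ≠ p) :
    pairs.foldl (fun l pv => l.set pv.1.toNat pv.2) (l.set p v)
      = (pairs.foldl (fun l pv => l.set pv.1.toNat pv.2) l).set p v := by
  induction pairs generalizing l with
  | nil => rfl
  | cons q rest ih =>
    simp only [List.foldl_cons]
    rw [List.set_comm v q.2 (fun he => h q (by simp) he.symm), ih _ (fun pv hm => h pv (by simp [hm]))]

lemma foldl_set_getE_ne (l : List Char) (pairs : List (Int × Char)) (j : Nat)
    (h : ∀ pv ∈ pairs, pv.1.toNat ≠ j) :
    (pairs.foldl (fun l pv => l.set pv.1.toNat pv.2) l)[j]? = l[j]? := by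
  induction pairs generalizing l with
  | nil => rfl
  | cons q rest ih =>
    simp only [List.foldl_cons]
    rw [ih _ (fun pv hm => h pv (by simp [hm])), List.getElem?_set_ne (h q (by simp))]

lemma foldl_set_vp (l : List Char) (pairs : List (Int × Char))
    (hv : ∀ pv ∈ pairs, isVoyelle pv.2 = true ∧ pv.1.toNat < l.length ∧
            isVoyelle (l.getD pv.1.toNat ' ') = true) (j : Nat) :
    isVoyelle ((pairs.foldl (fun l pv => l.set pv.1.toNat pv.2) l).getD j ' ')
      = isVoyelle (l.getD j ' ') := by
  induction pairs generalizing l with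
  | nil => rfl
  | cons q rest ih =>
    simp only [List.foldl_cons]
    obtain ⟨hq1, hq2, hq3⟩ := hv q (by simp)
    have hstep : ∀ j : Nat, isVoyelle ((l.set q.1.toNat q.2).getD j ' ') = isVoyelle (l.getD j ' ') := by
      intro j
      by_cases hj : q.1.toNat = j
      · subst hj
        rw [List.getD_eq_getElem?_getD] at hq3
        rw [List.getD_eq_getElem?_getD, List.getElem?_set_self hq2]
        simp [hq1, hq3]
      · rw [List.getD_eq_getElem?_getD, List.getElem?_set_ne hj, ← List.getD_eq_getElem?_getD]
    rw [ih _ ?_, hstep]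
    intro pv hm
    obtain ⟨h1, h2, h3⟩ := hv pv (by simp [hm])
    exact ⟨h1, by simpa using h2, by rw [hstep]; exact h3⟩

lemma mem_Z (li : List Char) (t : Nat) (pv : Int × Char)
    (h : pv ∈ ((vP li).dropLast.drop t).zip ((vV li).drop (t + 1))) :
    ∃ k, t ≤ k ∧ k + 1 < (vP li).length ∧ pv.1 = (vP li).getD k 0 ∧
      pv.2 = (vV li).getD (k + 1) ' ' := by
  obtain ⟨i, hi, he⟩ := List.mem_iff_getElem.1 h
  rw [List.getElem_zip] at he
  simp only [List.length_zip, List.length_drop, List.length_dropLast, vV_length] at hi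
  have hi1 : t + i < (vP li).length - 1 := by omega
  have hi2 : t + 1 + i < (vV li).length := by rw [vV_length]; omega
  refine ⟨t + i, by omega, by omega, ?_, ?_⟩
  · rw [List.getD_eq_getElem _ _ (by omega), ← he]
    simp [List.getElem_drop, List.getElem_dropLast]
  · rw [List.getD_eq_getElem _ _ (by omega), ← he]
    simp only [List.getElem_drop]
    congr 1
    omega

lemma stateL_getE_Pm (li : List Char) (t : Nat) (ht : t < (vP li).length) :
    (stateL li t)[((vP li).getD ((vP li).length - 1) 0).toNat]? = some ((vV li).getD t ' ') := by
  have hb := vP_bounds li ((vP li).length - 1) (by omega)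
  unfold stateL
  rw [List.getElem?_set_self (by rw [foldl_set_length]; omega)]

lemma stateL_getE_ne (li : List Char) (t : Nat) (ht : t < (vP li).length) (j : Nat)
    (h : ∀ k, t ≤ k → k < (vP li).length → ((vP li).getD k 0).toNat ≠ j) :
    (stateL li t)[j]? = li[j]? := by
  unfold stateL
  rw [List.getElem?_set_ne (h ((vP li).length - 1) (by omega) (by omega)),
    foldl_set_getE_ne]
  intro pv hm
  obtain ⟨k, hk1, hk2, he1, _⟩ := mem_Z li t pv hm
  rw [he1]
  exact h k hk1 (by omega)

lemma vp_getE (li : List Char) (k : Nat) (h : k < (vP li).length) :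
    isVoyelle (li[((vP li).getD k 0).toNat]?.getD ' ') = true := by
  have hb := vP_bounds li k h
  rw [List.getElem?_eq_getElem (by omega), Option.getD_some,
    ← pyGetD_toNat li _ hb.1 hb.2.1]
  exact hb.2.2

lemma stateL_vp (li : List Char) (t : Nat) (ht : t < (vP li).length) (j : Nat) :
    isVoyelle ((stateL li t).getD j ' ') = isVoyelle (li.getD j ' ') := by
  have hVt : isVoyelle ((vV li).getD t ' ') = true := by
    rw [vV_getD li t ht]; exact (vP_bounds li t ht).2.2
  have hfold : ∀ j : Nat,
      isVoyelle (((((vP li).dropLast.drop t).zip ((vV li).drop (t + 1))).foldl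
        (fun l pv => l.set pv.1.toNat pv.2) li).getD j ' ') = isVoyelle (li.getD j ' ') := by
    apply foldl_set_vp
    intro pv hm
    obtain ⟨k, hk1, hk2, he1, he2⟩ := mem_Z li t pv hm
    have hbk := vP_bounds li k (by omega)
    have hbk1 := vP_bounds li (k + 1) hk2
    refine ⟨?_, by omega, ?_⟩
    · rw [he2, vV_getD li (k + 1) hk2]; exact hbk1.2.2
    · rw [he1, List.getD_eq_getElem?_getD]
      exact vp_getE li k (by omega)
  have hbm := vP_bounds li ((vP li).length - 1) (by omega)
  by_cases hj : ((vP li).getD ((vP li).length - 1) 0).toNat = j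
  · subst hj
    rw [List.getD_eq_getElem?_getD, stateL_getE_Pm li t ht, Option.getD_some, hVt,
      List.getD_eq_getElem?_getD, vp_getE li _ (by omega)]
  · unfold stateL
    rw [List.getD_eq_getElem?_getD, List.getElem?_set_ne hj, ← List.getD_eq_getElem?_getD]
    exact hfold j

lemma swap_step (li : List Char) (t : Nat) (ht : t + 1 < (vP li).length) :
    stateL li t = ((stateL li (t + 1)).set ((vP li).getD t 0).toNat ((vV li).getD (t + 1) ' ')).set
      ((vP li).getD ((vP li).length - 1) 0).toNat ((vV li).getD t ' ') := by
  have hPD : (vP li).dropLast.length = (vP li).length - 1 := by simp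
  have hdropP : (vP li).dropLast.drop t
      = (vP li).getD t 0 :: (vP li).dropLast.drop (t + 1) := by
    rw [List.drop_eq_getElem_cons (by omega)]
    congr 1
    rw [List.getElem_dropLast, List.getD_eq_getElem _ _ (by omega)]
  have hdropV : (vV li).drop (t + 1) = (vV li).getD (t + 1) ' ' :: (vV li).drop (t + 2) := by
    rw [List.drop_eq_getElem_cons (by rw [vV_length]; omega)]
    congr 1
    rw [List.getD_eq_getElem _ _ (by rw [vV_length]; omega)]
  have hne : ∀ pv ∈ ((vP li).dropLast.drop (t + 1)).zip ((vV li).drop (t + 2)),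
      pv.1.toNat ≠ ((vP li).getD t 0).toNat := by
    intro pv hm
    obtain ⟨k, hk1, hk2, he1, _⟩ := mem_Z li (t + 1) pv hm
    have h1 := vP_strict li t k hk1 (by omega)
    have h2 := (vP_bounds li t (by omega)).1
    rw [he1]; omega
  have hPmne : ((vP li).getD t 0).toNat ≠ ((vP li).getD ((vP li).length - 1) 0).toNat := by
    have h1 := vP_strict li t ((vP li).length - 1) (by omega) (by omega)
    have h2 := (vP_bounds li t (by omega)).1
    omega
  unfold stateL
  rw [hdropP, hdropV, List.zip_cons_cons, List.foldl_cons]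
  rw [show (t + 1 + 1) = t + 2 from rfl]
  rw [foldl_set_comm _ _ _ _ hne]
  rw [List.set_comm _ _ hPmne.symm, List.set_set]

lemma stateL_top (li : List Char) (hL : 1 ≤ (vP li).length) :
    stateL li ((vP li).length - 1) = li := by
  have hb := vP_bounds li ((vP li).length - 1) (by omega)
  unfold stateL
  have hPD : (vP li).dropLast.drop ((vP li).length - 1) = [] := by
    apply List.drop_eq_nil_of_le; simp
  rw [hPD, List.zip_nil_left, List.foldl_nil, vV_getD li _ (by omega),
    pyGetD_toNat li _ hb.1 hb.2.1]
  exact List.set_getElem_self (by omega)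

-- isVoyelle (pyGetD …) true forces the index in range
lemma vowel_in_range (li : List Char) (i : Int) (h0 : 0 ≤ i)
    (h : isVoyelle (PySem.List.pyGetD li i ' ') = true) : i < li.length := by
  by_contra hc
  rw [PySem.List.pyGetD_of_nonneg _ _ h0, List.getD_eq_getElem?_getD,
    List.getElem?_eq_none (by omega)] at h
  simp [isVoyelle] at h

lemma gn_none : ∀ (k : Nat) (li : List Char) (pos : Int), (pos + 1).toNat ≤ k →
    (∀ j : Int, 0 ≤ j → j ≤ pos → isVoyelle (PySem.List.pyGetD li j ' ') = false) →
    get_next_pos_voyelle_r li pos = (li.length : Int) - 1 := by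
  intro k
  induction k with
  | zero =>
    intro li pos hk h
    unfold get_next_pos_voyelle_r
    rw [dif_neg (by omega)]
  | succ k ih =>
    intro li pos hk h
    unfold get_next_pos_voyelle_r
    by_cases hp : pos > -1
    · rw [dif_pos hp, if_neg (by simp [h pos (by omega) le_rfl])]
      exact ih li (pos - 1) (by omega) (fun j h1 h2 => h j h1 (by omega))
    · rw [dif_neg hp]

lemma gn_found : ∀ (k : Nat) (li : List Char) (q pos : Int), (pos - q).toNat ≤ k →
    0 ≤ q → q ≤ pos → isVoyelle (PySem.List.pyGetD li q ' ') = true →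
    (∀ j : Int, q < j → j ≤ pos → isVoyelle (PySem.List.pyGetD li j ' ') = false) →
    get_next_pos_voyelle_r li pos = q := by
  intro k
  induction k with
  | zero =>
    intro li q pos hk h0 hle hq habove
    have : pos = q := by omega
    subst this
    unfold get_next_pos_voyelle_r
    rw [dif_pos (by omega), if_pos hq]
  | succ k ih =>
    intro li q pos hk h0 hle hq habove
    by_cases he : pos = q
    · subst he
      unfold get_next_pos_voyelle_r
      rw [dif_pos (by omega), if_pos hq]
    · unfold get_next_pos_voyelle_r
      rw [dif_pos (by omega), if_neg (by simp [habove pos (by omega) le_rfl])]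
      exact ih li q (pos - 1) (by omega) h0 (by omega) hq
        (fun j h1 h2 => habove j h1 (by omega))

-- vowelness through stateL, Int-indexed
lemma stateL_vpI (li : List Char) (t : Nat) (ht : t < (vP li).length) (i : Int) (h0 : 0 ≤ i) :
    isVoyelle (PySem.List.pyGetD (stateL li t) i ' ')
      = isVoyelle (PySem.List.pyGetD li i ' ') := by
  rw [PySem.List.pyGetD_of_nonneg _ _ h0, PySem.List.pyGetD_of_nonneg _ _ h0]
  exact stateL_vp li t ht i.toNat

lemma descNoVowel : ∀ (k : Nat) (li : List Char) (i poss idx : Int), (i + 1).toNat ≤ k →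
    (∀ j : Int, 0 ≤ j → j ≤ i → isVoyelle (PySem.List.pyGetD li j ' ') = false) →
    switchLeftLoop li i poss idx = li := by
  intro k
  induction k with
  | zero =>
    intro li i poss idx hk h
    unfold switchLeftLoop
    rw [dif_neg (by omega)]
  | succ k ih =>
    intro li i poss idx hk h
    unfold switchLeftLoop
    by_cases hi : i > -1
    · have hv := h i (by omega) le_rfl
      rw [dif_pos hi, if_neg (by simp [hv]), if_neg (by simp [hv])]
      exact ih li (i - 1) poss idx (by omega) (fun j h1 h2 => h j h1 (by omega))
    · rw [dif_neg hi]

lemma vowel_index (li : List Char) (i : Int) (h0 : 0 ≤ i)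
    (hv : isVoyelle (PySem.List.pyGetD li i ' ') = true) :
    ∃ k, k < (vP li).length ∧ (vP li).getD k 0 = i :=
  vP_exists li i h0 (vowel_in_range li i h0 hv) hv

lemma stateL_read_Pm (li : List Char) (t : Nat) (ht : t < (vP li).length) :
    PySem.List.pyGetD (stateL li t) ((vP li).getD ((vP li).length - 1) 0) ' '
      = (vV li).getD t ' ' := by
  have hb := vP_bounds li ((vP li).length - 1) (by omega)
  rw [PySem.List.pyGetD_of_nonneg _ _ hb.1, List.getD_eq_getElem?_getD,
    stateL_getE_Pm li t ht, Option.getD_some]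

lemma stateL_read_lt (li : List Char) (t : Nat) (ht : t < (vP li).length)
    (k : Nat) (hkt : k < t) :
    PySem.List.pyGetD (stateL li t) ((vP li).getD k 0) ' ' = (vV li).getD k ' ' := by
  have hb := vP_bounds li k (by omega)
  rw [PySem.List.pyGetD_of_nonneg _ _ hb.1, List.getD_eq_getElem?_getD,
    stateL_getE_ne li t ht _ ?_, ← List.getD_eq_getElem?_getD,
    ← PySem.List.pyGetD_of_nonneg _ _ hb.1, ← vV_getD li k (by omega)]
  intro k' h1 h2
  have := vP_strict li k k' (by omega) h2
  have := (vP_bounds li k' h2).1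
  omega

lemma desc0 : ∀ (k : Nat) (li : List Char) (i idx : Int), (i + 1).toNat ≤ k →
    2 ≤ (vP li).length → i < (vP li).getD 1 0 →
    switchLeftLoop (stateL li 0) i ((vP li).getD 0 0) idx = stateL li 0 := by
  intro k
  induction k with
  | zero =>
    intro li i idx hk _ _
    unfold switchLeftLoop
    rw [dif_neg (by omega)]
  | succ k ih =>
    intro li i idx hk hL hi1
    by_cases hi : i > -1
    · unfold switchLeftLoop
      rw [dif_pos hi]
      have hvp := stateL_vpI li 0 (by omega) i (by omega)
      by_cases hv : isVoyelle (PySem.List.pyGetD li i ' ') = true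
      · obtain ⟨kk, hkk, hPkk⟩ := vowel_index li i (by omega) hv
        have hk0 : kk = 0 := by
          rcases Nat.lt_or_ge kk 1 with h | h
          · omega
          · exfalso
            have hg : (vP li).getD 1 0 ≤ (vP li).getD kk 0 := by
              rcases Nat.lt_or_ge 1 kk with h' | h'
              · exact le_of_lt (vP_strict li 1 kk h' hkk)
              · have : kk = 1 := by omega
                simp [this]
            omega
        subst hk0
        by_cases hz : (vP li).getD 0 0 = 0
        · rw [if_pos (by rw [List.getD_eq_getElem?_getD] at hz; simp [hvp, hv, hz])]
          have : i = 0 := by omega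
          subst this
          have hgn : get_next_pos_voyelle_r (stateL li 0) (0 - 1)
              = ((stateL li 0).length : Int) - 1 := by
            unfold get_next_pos_voyelle_r
            rw [dif_neg (by omega)]
          simp only [hgn]
          rw [if_pos (by simp)]
        · rw [if_neg (by rw [List.getD_eq_getElem?_getD] at hz; simp [hz]),
            if_neg (by simp [← hPkk]),
            ih li (i - 1) idx (by omega) hL (by omega)]
      · simp only [Bool.not_eq_true] at hv
        rw [if_neg (by simp [hvp, hv]), if_neg (by simp [hvp, hv]),
          ih li (i - 1) idx (by omega) hL (by omega)]
    · unfold switchLeftLoop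
      rw [dif_neg hi]

lemma descMid : ∀ (k : Nat) (li : List Char) (t : Nat) (i : Int), (i + 1).toNat ≤ k →
    1 ≤ t → t + 1 < (vP li).length →
    (vP li).getD (t - 1) 0 ≤ i → i < (vP li).getD (t + 1) 0 →
    switchLeftLoop (stateL li t) i ((vP li).getD t 0) ((vP li).getD ((vP li).length - 1) 0)
      = stateL li 0 := by
  intro k
  induction k with
  | zero =>
    intro li t i hk ht1 ht2 hi0 hi1
    have := (vP_bounds li (t - 1) (by omega)).1
    omega
  | succ k ih =>
    intro li t i hk ht1 ht2 hi0 hi1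
    have hbt := vP_bounds li t (by omega)
    have hbt1 := (vP_bounds li (t - 1) (by omega)).1
    have hstrict : (vP li).getD (t - 1) 0 < (vP li).getD t 0 := vP_strict li (t - 1) t (by omega) (by omega)
    have hstrict1 : (vP li).getD t 0 < (vP li).getD (t + 1) 0 := vP_strict li t (t + 1) (by omega) (by omega)
    have hPtne : (((vP li)[t]?.getD 0 : Int) == 0) = false := by
      rw [← List.getD_eq_getElem?_getD, beq_eq_false_iff_ne]; omega
    unfold switchLeftLoop
    rw [dif_pos (by omega)]
    have hvp := stateL_vpI li t (by omega) i (by omega)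
    by_cases hv : isVoyelle (PySem.List.pyGetD li i ' ') = true
    · obtain ⟨kk, hkk, hPkk⟩ := vowel_index li i (by omega) hv
      have hklo : t - 1 ≤ kk := by
        by_contra hc
        have := vP_strict li kk (t - 1) (by omega) (by omega)
        omega
      have hkhi : kk ≤ t := by
        by_contra hc
        have h1 : (vP li).getD (t + 1) 0 ≤ (vP li).getD kk 0 := by
          rcases Nat.lt_or_ge (t + 1) kk with h' | h'
          · exact le_of_lt (vP_strict li (t + 1) kk h' hkk)
          · have : kk = t + 1 := by omega
            simp [this]
        omega
      by_cases hkt : kk = t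
      · -- i = P t : both branches skipped (i == poss, poss ≠ 0)
        rw [hkt] at hPkk
        have hieq : ((i == ((vP li)[t]?.getD 0 : Int))) = true := by
          rw [← List.getD_eq_getElem?_getD, beq_iff_eq]; omega
        rw [if_neg (by simp [hPtne]), if_neg (by simp [hieq])]
        exact ih li t (i - 1) (by omega) ht1 ht2 (by omega) (by omega)
      · have hkt1 : kk = t - 1 := by omega
        rw [hkt1] at hPkk
        have hieq : i = (vP li).getD (t - 1) 0 := hPkk.symm
        have hine : ((i == ((vP li)[t]?.getD 0 : Int))) = false := by
          rw [← List.getD_eq_getElem?_getD, beq_eq_false_iff_ne]; omega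
        rw [if_neg (by simp [hPtne]), if_pos (by simp [hvp, hv, hine])]
        show switchLeftLoop
            (PySem.List.pySetD
              (PySem.List.pySetD (stateL li t) i
                (PySem.List.pyGetD (stateL li t) ((vP li).getD ((vP li).length - 1) 0) ' '))
              ((vP li).getD ((vP li).length - 1) 0)
              (PySem.List.pyGetD (stateL li t) i ' '))
            (i - 1) i ((vP li).getD ((vP li).length - 1) 0) = stateL li 0
        have hbm := vP_bounds li ((vP li).length - 1) (by omega)
        have hread1 := stateL_read_Pm li t (by omega)
        have hread2 : PySem.List.pyGetD (stateL li t) i ' ' = (vV li).getD (t - 1) ' ' := by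
          rw [hieq]
          exact stateL_read_lt li t (by omega) (t - 1) (by omega)
        rw [hread1, hread2,
          PySem.List.pySetD_of_nonneg _ _ (by omega : (0:Int) ≤ i),
          PySem.List.pySetD_of_nonneg _ _ hbm.1]
        have ht' : t - 1 + 1 = t := by omega
        have hswap := swap_step li (t - 1) (by omega)
        rw [ht'] at hswap
        rw [hieq, ← hswap]
        rcases Nat.lt_or_ge t 2 with h2 | h2
        · -- t = 1 : tail handled by desc0
          have ht1' : t - 1 = 0 := by omega
          rw [ht1']
          have hone : t = 1 := by omega
          refine desc0 ((vP li).getD 0 0 - 1 + 1).toNat li _ _ le_rfl (by omega) ?_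
          rw [ht1'] at hstrict
          rw [hone] at hstrict
          omega
        · -- t ≥ 2 : continue the main descent
          have hs2 := vP_strict li (t - 2) (t - 1) (by omega) (by omega)
          have hb2 := (vP_bounds li (t - 2) (by omega)).1
          refine ih li (t - 1) ((vP li).getD (t - 1) 0 - 1) (by omega) (by omega) (by omega) ?_ ?_
          · have : t - 1 - 1 = t - 2 := by omega
            rw [this]; omega
          · rw [ht']; omega
    · simp only [Bool.not_eq_true] at hv
      rw [if_neg (by simp [hvp, hv]), if_neg (by simp [hvp, hv])]
      have hine : i ≠ (vP li).getD (t - 1) 0 := by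
        intro he
        have hvt := (vP_bounds li (t - 1) (by omega)).2.2
        rw [← he] at hvt
        simp [hv] at hvt
      exact ih li t (i - 1) (by omega) ht1 ht2 (by omega) (by omega)

lemma desc1 : ∀ (k : Nat) (li : List Char) (i : Int), (i + 1).toNat ≤ k →
    (vP li).length = 1 → (vP li).getD 0 0 ≤ i →
    switchLeftLoop li i 0 (-1) = li := by
  intro k
  induction k with
  | zero =>
    intro li i hk hL hi0
    have := (vP_bounds li 0 (by omega)).1
    omega
  | succ k ih =>
    intro li i hk hL hi0
    have hb0 := vP_bounds li 0 (by omega)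
    unfold switchLeftLoop
    rw [dif_pos (by omega)]
    by_cases hv : isVoyelle (PySem.List.pyGetD li i ' ') = true
    · obtain ⟨kk, hkk, hPkk⟩ := vowel_index li i (by omega) hv
      have hk0 : kk = 0 := by omega
      rw [hk0] at hPkk
      rw [if_pos (by simp [hv])]
      have hgn : get_next_pos_voyelle_r li (i - 1) = (li.length : Int) - 1 := by
        apply gn_none (i - 1 + 1).toNat li (i - 1) le_rfl
        intro j h1 h2
        by_contra hc
        simp only [Bool.not_eq_false] at hc
        obtain ⟨k', hk', hPk'⟩ := vowel_index li j h1 hc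
        have : k' = 0 := by omega
        rw [this] at hPk'
        omega
      simp only [hgn]
      rw [if_pos (by simp)]
    · simp only [Bool.not_eq_true] at hv
      have hine : i ≠ (vP li).getD 0 0 := by
        intro he
        have hvt := hb0.2.2
        rw [← he] at hvt
        simp [hv] at hvt
      rw [if_neg (by simp [hv]), if_neg (by simp [hv])]
      exact ih li (i - 1) (by omega) hL (by omega)

lemma descTop : ∀ (k : Nat) (li : List Char) (i : Int), (i + 1).toNat ≤ k →
    2 ≤ (vP li).length → (vP li).getD ((vP li).length - 1) 0 ≤ i →
    switchLeftLoop li i 0 (-1) = stateL li 0 := by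
  intro k
  induction k with
  | zero =>
    intro li i hk hL hi0
    have := (vP_bounds li ((vP li).length - 1) (by omega)).1
    omega
  | succ k ih =>
    intro li i hk hL hi0
    have hbm := vP_bounds li ((vP li).length - 1) (by omega)
    have hbm1 := vP_bounds li ((vP li).length - 2) (by omega)
    have hsm : (vP li).getD ((vP li).length - 2) 0 < (vP li).getD ((vP li).length - 1) 0 :=
      vP_strict li ((vP li).length - 2) ((vP li).length - 1) (by omega) (by omega)
    unfold switchLeftLoop
    rw [dif_pos (by omega)]
    by_cases hv : isVoyelle (PySem.List.pyGetD li i ' ') = true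
    · obtain ⟨kk, hkk, hPkk⟩ := vowel_index li i (by omega) hv
      have hkm : kk = (vP li).length - 1 := by
        by_contra hc
        have := vP_strict li kk ((vP li).length - 1) (by omega) (by omega)
        omega
      rw [hkm] at hPkk
      rw [if_pos (by simp [hv])]
      have hgn : get_next_pos_voyelle_r li (i - 1) = (vP li).getD ((vP li).length - 2) 0 := by
        apply gn_found (i - 1 - (vP li).getD ((vP li).length - 2) 0).toNat li _ (i - 1)
          le_rfl hbm1.1 (by omega) hbm1.2.2
        intro j h1 h2
        by_contra hc
        simp only [Bool.not_eq_false] at hc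
        obtain ⟨k', hk', hPk'⟩ := vowel_index li j (by omega) hc
        have hup : k' ≤ (vP li).length - 1 := by omega
        rcases Nat.lt_or_ge k' ((vP li).length - 1) with hlt | hge
        · rcases Nat.lt_or_ge k' ((vP li).length - 2) with hlt' | hge'
          · have := vP_strict li k' ((vP li).length - 2) hlt' (by omega)
            omega
          · have : k' = (vP li).length - 2 := by omega
            rw [this] at hPk'
            omega
        · have : k' = (vP li).length - 1 := by omega
          rw [this] at hPk'
          omega
      simp only [hgn]
      rw [if_neg (by simp only [beq_iff_eq]; omega)]
      show switchLeftLoop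
          (PySem.List.pySetD
            (PySem.List.pySetD li ((vP li).getD ((vP li).length - 2) 0)
              (PySem.List.pyGetD li i ' '))
            i (PySem.List.pyGetD li ((vP li).getD ((vP li).length - 2) 0) ' '))
          (i - 1) ((vP li).getD ((vP li).length - 2) 0) i = stateL li 0
      have hr1 : PySem.List.pyGetD li i ' ' = (vV li).getD ((vP li).length - 1) ' ' := by
        rw [← hPkk, ← vV_getD li _ (by omega)]
      have hr2 : PySem.List.pyGetD li ((vP li).getD ((vP li).length - 2) 0) ' '
          = (vV li).getD ((vP li).length - 2) ' ' := by
        rw [← vV_getD li _ (by omega)]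
      rw [hr1, hr2, PySem.List.pySetD_of_nonneg _ _ hbm1.1,
        PySem.List.pySetD_of_nonneg _ _ (by omega : (0:Int) ≤ i)]
      have hswap := swap_step li ((vP li).length - 2) (by omega)
      have he1 : (vP li).length - 2 + 1 = (vP li).length - 1 := by omega
      rw [he1, stateL_top li (by omega)] at hswap
      rw [← hPkk]
      rw [← hswap]
      rcases Nat.lt_or_ge (vP li).length 3 with h3 | h3
      · -- L = 2 : tail via desc0
        have : (vP li).length - 2 = 0 := by omega
        rw [this]
        refine desc0 ((vP li).getD ((vP li).length - 1) 0 - 1 + 1).toNat li _ _ le_rfl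
          (by omega) ?_
        have h21 : (vP li).length - 1 = 1 := by omega
        rw [h21]
        omega
      · -- L ≥ 3 : main descent with t = L - 2
        refine descMid ((vP li).getD ((vP li).length - 1) 0 - 1 + 1).toNat li
          ((vP li).length - 2) _ le_rfl (by omega) (by omega) ?_ ?_
        · have hs2 := vP_strict li ((vP li).length - 3) ((vP li).length - 2) (by omega) (by omega)
          have hb2 := (vP_bounds li ((vP li).length - 3) (by omega)).1
          have : (vP li).length - 2 - 1 = (vP li).length - 3 := by omega
          rw [this]; omega
        · rw [he1]; omega
    · simp only [Bool.not_eq_true] at hv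
      have hine : i ≠ (vP li).getD ((vP li).length - 1) 0 := by
        intro he
        have hvt := hbm.2.2
        rw [← he] at hvt
        simp [hv] at hvt
      rw [if_neg (by simp [hv]), if_neg (by simp [hv])]
      exact ih li (i - 1) (by omega) hL (by omega)

lemma contains_eq (c : Char) : (("aeiouy".toList).contains c) = isVoyelle c := by
  show (['a','e','i','o','u','y'].contains c) = isVoyelle c
  simp [List.contains_eq_mem, isVoyelle, Bool.or_assoc]

lemma vP_positions (li : List Char) :
    ((PySem.List.enumerate li 0).filter (fun ic => ("aeiouy".toList).contains ic.2)).map (·.1)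
      = vP li := by
  unfold vP
  congr 1
  apply List.filter_congr
  intro x _
  exact contains_eq x.2

lemma foldl_pySetD_eq (pairs : List (Int × Char)) (l : List Char)
    (h : ∀ pv ∈ pairs, 0 ≤ pv.1) :
    pairs.foldl (fun l pv => PySem.List.pySetD l pv.1 pv.2) l
      = pairs.foldl (fun l pv => l.set pv.1.toNat pv.2) l := by
  induction pairs generalizing l with
  | nil => rfl
  | cons q rest ih =>
    simp only [List.foldl_cons]
    rw [PySem.List.pySetD_of_nonneg _ _ (h q (by simp)), ih _ (fun pv hm => h pv (by simp [hm]))]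

lemma alt_char (st : String) : switch_left_alt st =
    if (vP st.toList).length ≤ 1 then String.ofList st.toList
    else String.ofList (stateL st.toList 0) := by
  unfold switch_left_alt
  simp only [vP_positions]
  by_cases hL : (vP st.toList).length ≤ 1
  · rw [if_pos hL, if_pos hL]
  · rw [if_neg hL, if_neg hL]
    congr 1
    have hL2 : 2 ≤ (vP st.toList).length := by omega
    have hbm := vP_bounds st.toList ((vP st.toList).length - 1) (by omega)
    rw [PySem.List.slice_from _ (by omega : (0:Int) ≤ 1),
      PySem.List.slice_to _ (by omega : (0:Int) ≤ 1)]
    have hVlen : (vV st.toList).length = (vP st.toList).length := vV_length st.toList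
    have hPne : vP st.toList ≠ [] := by
      intro he
      rw [he] at hL2
      simp at hL2
    have htake : (vV st.toList).take 1 = [(vV st.toList).getD 0 ' '] := by
      cases hV : vV st.toList with
      | nil => rw [hV] at hVlen; simp at hVlen; omega
      | cons v vs => simp [List.getD]
    have hsplit : vP st.toList
        = (vP st.toList).dropLast ++ [(vP st.toList).getD ((vP st.toList).length - 1) 0] := by
      conv_lhs => rw [← List.dropLast_concat_getLast hPne]
      rw [List.getLast_eq_getElem, List.getD_eq_getElem _ _ (by omega)]
    have hzip : (vP st.toList).zip ((vV st.toList).drop 1 ++ (vV st.toList).take 1)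
        = (vP st.toList).dropLast.zip ((vV st.toList).drop 1)
          ++ [((vP st.toList).getD ((vP st.toList).length - 1) 0, (vV st.toList).getD 0 ' ')] := by
      rw [htake]
      conv_lhs => rw [hsplit]
      rw [List.zip_append (by simp [hVlen])]
      simp
    rw [show (List.map (fun p => PySem.List.pyGetD st.toList p ' ') (vP st.toList)) = vV st.toList from rfl,
      show Int.toNat 1 = 1 from rfl]
    rw [foldl_pySetD_eq _ _ ?_]
    · rw [hzip, List.foldl_append, List.foldl_cons, List.foldl_nil]
      unfold stateL
      rw [List.drop_zero]
    · intro pv hm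
      have : pv.1 ∈ vP st.toList := (List.of_mem_zip hm).1
      exact ((mem_vP _ _).1 this).1

lemma main_eq (st : String) : switch_left st = switch_left_alt st := by
  rw [alt_char]
  unfold switch_left
  show String.ofList (switchLeftLoop st.toList ((st.toList.length : Int) - 1) 0 (-1)) = _
  rcases Nat.lt_or_ge (vP st.toList).length 2 with hL | hL
  · rw [if_pos (by omega)]
    congr 1
    rcases Nat.lt_or_ge (vP st.toList).length 1 with hL0 | hL1
    · -- no vowels at all
      apply descNoVowel ((st.toList.length : Int) - 1 + 1).toNat _ _ _ _ le_rfl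
      intro j h1 h2
      by_contra hc
      simp only [Bool.not_eq_false] at hc
      obtain ⟨k', hk', _⟩ := vowel_index st.toList j h1 hc
      omega
    · -- exactly one vowel
      have hb0 := vP_bounds st.toList 0 (by omega)
      exact desc1 ((st.toList.length : Int) - 1 + 1).toNat _ _ le_rfl (by omega) (by omega)
  · rw [if_neg (by omega)]
    congr 1
    have hbm := vP_bounds st.toList ((vP st.toList).length - 1) (by omega)
    exact descTop ((st.toList.length : Int) - 1 + 1).toNat _ _ le_rfl hL (by omega)

-- ===== VERDICT (by name: the statement is the Claim_ definition above) =====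
theorem switch_left_spec : Claim_equal_switch_left := by
  intro st _
  exact main_eq st
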